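-- pv_equiv track=rewrite | github.com/lraithel/cross_ling_drug_ner | src/finetune_ner.py | sort_by_language
-- ===== SOURCE A (Python) =====
-- def sort_by_language(predictions, labels, languages):
--     """Make one set of predictions-labels for each language."""
--     by_language = {
--         lang: {"predictions": [], "true_labels": []} for lang in languages
--     }
--
--     for pred, label, language in zip(predictions, labels, languages):
--         by_language[language]["predictions"].append(pred)
--         by_language[language]["true_labels"].append(label)
--
--     return by_language
-- ===== SOURCE B (Python) =====
-- def sort_by_language(predictions, labels, languages):
--     """Make one set of predictions-labels for each language."""
--     triples = list(zip(predictions, labels, languages))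
--     by_language = {}
--     for language in languages:
--         if language not in by_language:
--             by_language[language] = {
--                 "predictions": [p for p, _, lg in triples if lg == language],
--                 "true_labels": [l for _, l, lg in triples if lg == language],
--             }
--     return by_language
-- ===== Notes on version B (the rewrite author's own statement) =====
-- stated objective: alternative
-- what changed: A does one scatter pass appending each zipped triple into a pre-built per-language dict; B materializes the zipped triples once and, iterating over languages with a seen-check, builds each language's entry in one go by filtering the triples, so the mutating scatter pass disappears.
import Mathlib
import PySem

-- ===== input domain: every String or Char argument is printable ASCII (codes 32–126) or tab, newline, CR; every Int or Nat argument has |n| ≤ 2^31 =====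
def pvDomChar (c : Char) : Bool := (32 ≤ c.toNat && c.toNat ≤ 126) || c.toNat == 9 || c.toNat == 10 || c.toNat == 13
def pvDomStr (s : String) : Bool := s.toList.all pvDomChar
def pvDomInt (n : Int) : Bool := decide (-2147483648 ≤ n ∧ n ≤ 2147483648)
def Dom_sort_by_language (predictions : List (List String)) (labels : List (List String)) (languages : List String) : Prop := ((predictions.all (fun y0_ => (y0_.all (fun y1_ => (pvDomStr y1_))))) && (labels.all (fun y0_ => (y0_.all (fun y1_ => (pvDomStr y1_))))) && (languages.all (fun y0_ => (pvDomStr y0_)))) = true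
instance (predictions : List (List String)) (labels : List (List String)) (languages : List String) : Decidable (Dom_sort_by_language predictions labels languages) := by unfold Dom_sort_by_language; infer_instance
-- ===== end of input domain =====

-- B replaces A's single scatter-append pass over zip(...) by a per-language filter over the
-- materialized triples (same dict, keys in first-occurrence order); alternative decomposition, not faster.

-- ===== PORT A =====
-- A builds {lang: {"predictions": [], "true_labels": []}} for every language, then appends each
-- zipped (pred, label, language) triple into its language's two lists.  Python's
-- by_language[language][...] lookup always succeeds (language comes from zip with languages),
-- so Dict.modify with a dummy default is exact here.  The returned dict of dicts is the
-- association list of (language, association list of the two keys).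
def sort_by_language (predictions : List (List String)) (labels : List (List String)) (languages : List String) : List (String × List (String × List (List String))) :=
  ((((predictions.zip labels).zip languages).foldl
      (fun d t => d.modify t.2 PySem.Dict.empty (fun inner =>
        (inner.modify "predictions" [] (fun ps => ps ++ [t.1.1])).modify "true_labels" [] (fun ls => ls ++ [t.1.2])))
      (languages.foldl
        (fun d lang => d.insert lang (PySem.Dict.ofList [("predictions", ([] : List (List String))), ("true_labels", [])]))
        PySem.Dict.empty)).items).map (fun p => (p.1, p.2.items))

-- ===== PORT B =====
-- B materializes triples = list(zip(predictions, labels, languages)) once, then iterates over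
-- languages with a seen-check, building each fresh language's whole entry by filtering the triples.
def sort_by_language_alt (predictions : List (List String)) (labels : List (List String)) (languages : List String) : List (String × List (String × List (List String))) :=
  languages.foldl
    (fun out language =>
      if out.any (fun q => q.1 == language) then out
      else out ++ [(language,
        [("predictions", (((predictions.zip labels).zip languages).filter (fun t => t.2 == language)).map (fun t => t.1.1)),
         ("true_labels", (((predictions.zip labels).zip languages).filter (fun t => t.2 == language)).map (fun t => t.1.2))])])
    []

-- ===== PRECONDITION & SPEC =====
def Spec_sort_by_language (predictions : List (List String)) (labels : List (List String)) (languages : List String) (out : List (String × List (String × List (List String)))) : Prop := out = sort_by_language_alt predictions labels languages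
instance (predictions : List (List String)) (labels : List (List String)) (languages : List String) (out : List (String × List (String × List (List String)))) : Decidable (Spec_sort_by_language predictions labels languages out) := by unfold Spec_sort_by_language; infer_instance

-- ===== CLAIM (what is proved, stated in full; the proofs are below) =====
def Claim_equal_sort_by_language : Prop := ∀ (predictions : List (List String)) (labels : List (List String)) (languages : List String), Dom_sort_by_language predictions labels languages → Spec_sort_by_language predictions labels languages (sort_by_language predictions labels languages)

-- ===== LEMMAS AND PROOFS =====

-- `any` over a keyed map is membership of the key list
theorem pv_any_map_key {ν : Type} (s : List String) (g : String → ν) (x : String) :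
    (s.map (fun k => (k, g k))).any (fun q => q.1 == x) = decide (x ∈ s) := by
  induction s with
  | nil => rfl
  | cons a s ih =>
    by_cases hax : a = x
    · subst hax; simp
    · simp [List.any_cons, ih, hax, Ne.symm hax]

theorem pv_set_contains (s : List String) (x : String) :
    PySem.Set.contains s x = decide (x ∈ s) := by
  simp [PySem.Set.contains]

-- get? on a keyed map returns the value at the key
theorem pv_mkmap_get? {ν : Type} (s : List String) (g : String → ν) (x : String) (h : x ∈ s) :
    (PySem.Dict.mk (s.map (fun k => (k, g k)))).get? x = some (g x) := by
  induction s with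
  | nil => cases h
  | cons a s ih =>
    rw [List.map_cons, PySem.Dict.get?_mk_cons]
    by_cases hax : a = x
    · subst hax; simp
    · have hx : x ∈ s := by
        rcases List.mem_cons.mp h with h' | h'
        · exact absurd h'.symm hax
        · exact h'
      simp [hax, ih hx]

theorem pv_mkmap_getD {ν : Type} (s : List String) (g : String → ν) (x : String) (d0 : ν) (h : x ∈ s) :
    (PySem.Dict.mk (s.map (fun k => (k, g k)))).getD x d0 = g x := by
  rw [PySem.Dict.getD_eq_get?_getD, pv_mkmap_get? s g x h]
  rfl

-- insert on a keyed map: overwrite in place, or append a fresh key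
theorem pv_mkmap_insert {ν : Type} (s : List String) (g : String → ν) (x : String) (v : ν) :
    (PySem.Dict.mk (s.map (fun k => (k, g k)))).insert x v
      = PySem.Dict.mk ((PySem.Set.add s x).map (fun k => (k, if k = x then v else g k))) := by
  have hc : (PySem.Dict.mk (s.map (fun k => (k, g k)))).contains x = decide (x ∈ s) := by
    simp only [PySem.Dict.contains]
    exact pv_any_map_key s g x
  unfold PySem.Dict.insert PySem.Set.add
  rw [hc, pv_set_contains]
  by_cases hm : x ∈ s
  · simp only [hm, decide_true, if_true]
    congr 1
    rw [List.map_map]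
    apply List.map_congr_left
    intro k hk
    by_cases hkx : k = x
    · subst hkx; simp
    · simp [hkx]
  · simp only [hm, decide_false, Bool.false_eq_true, if_false]
    congr 1
    rw [List.map_append]
    congr 1
    · apply List.map_congr_left
      intro k hk
      have : k ≠ x := fun h => hm (h ▸ hk)
      simp [this]
    · simp

-- modify at a present key rewrites exactly that entry
theorem pv_mkmap_modify {ν : Type} (s : List String) (g : String → ν) (x : String) (d0 : ν) (f : ν → ν) (h : x ∈ s) :
    (PySem.Dict.mk (s.map (fun k => (k, g k)))).modify x d0 f
      = PySem.Dict.mk (s.map (fun k => (k, if k = x then f (g x) else g k))) := by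
  unfold PySem.Dict.modify
  rw [pv_mkmap_getD s g x d0 h, pv_mkmap_insert s g x (f (g x))]
  have : PySem.Set.add s x = s := by
    unfold PySem.Set.add
    rw [pv_set_contains]
    simp [h]
  rw [this]

-- the inner two-key dict update of port A, computed
theorem pv_inner_step (ps ls : List (List String)) (p l : List String) :
    ((PySem.Dict.mk [("predictions", ps), ("true_labels", ls)]).modify "predictions" [] (fun a => a ++ [p])).modify "true_labels" [] (fun a => a ++ [l])
      = PySem.Dict.mk [("predictions", ps ++ [p]), ("true_labels", ls ++ [l])] := by
  simp [PySem.Dict.modify, PySem.Dict.insert, PySem.Dict.contains, PySem.Dict.getD_eq_get?_getD, PySem.Dict.get?_mk_cons]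

-- one scatter step of port A on the invariant shape
theorem pv_step_eq (s : List String) (A B : String → List (List String)) (t : (List String × List String) × String) (ht : t.2 ∈ s) :
    (PySem.Dict.mk (s.map (fun k => (k, PySem.Dict.mk [("predictions", A k), ("true_labels", B k)])))).modify t.2 PySem.Dict.empty
      (fun inner => (inner.modify "predictions" [] (fun ps => ps ++ [t.1.1])).modify "true_labels" [] (fun ls => ls ++ [t.1.2]))
    = PySem.Dict.mk (s.map (fun k => (k, PySem.Dict.mk
        [("predictions", if k = t.2 then A k ++ [t.1.1] else A k),
         ("true_labels", if k = t.2 then B k ++ [t.1.2] else B k)]))) := by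
  rw [pv_mkmap_modify s (fun k => PySem.Dict.mk [("predictions", A k), ("true_labels", B k)]) t.2 PySem.Dict.empty _ ht]
  congr 1
  apply List.map_congr_left
  intro k hk
  by_cases hkx : k = t.2
  · subst hkx; simp [pv_inner_step]
  · simp [hkx]

-- the whole scatter pass of port A equals per-key filtered appends
theorem pv_fold_modify_eq (ts : List ((List String × List String) × String)) (s : List String)
    (A B : String → List (List String)) (h : ∀ t ∈ ts, t.2 ∈ s) :
    ts.foldl (fun d t => d.modify t.2 PySem.Dict.empty (fun inner =>
        (inner.modify "predictions" [] (fun ps => ps ++ [t.1.1])).modify "true_labels" [] (fun ls => ls ++ [t.1.2])))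
      (PySem.Dict.mk (s.map (fun k => (k, PySem.Dict.mk [("predictions", A k), ("true_labels", B k)]))))
    = PySem.Dict.mk (s.map (fun k => (k, PySem.Dict.mk
        [("predictions", A k ++ (ts.filter (fun t => t.2 == k)).map (fun t => t.1.1)),
         ("true_labels", B k ++ (ts.filter (fun t => t.2 == k)).map (fun t => t.1.2))]))) := by
  induction ts generalizing A B with
  | nil => simp
  | cons t ts ih =>
    rw [List.foldl_cons, pv_step_eq s A B t (h t (by simp))]
    rw [ih (fun k => if k = t.2 then A k ++ [t.1.1] else A k) (fun k => if k = t.2 then B k ++ [t.1.2] else B k)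
        (fun t' ht' => h t' (by simp [ht']))]
    congr 1
    apply List.map_congr_left
    intro k hk
    by_cases hkx : k = t.2
    · subst hkx
      simp [List.append_assoc]
    · have hne : (t.2 == k) = false := by simp [Ne.symm hkx]
      simp [hne, hkx]

-- the dict-comprehension init of port A
theorem pv_init_eq (langs s : List String) :
    langs.foldl
      (fun d lang => d.insert lang (PySem.Dict.ofList [("predictions", ([] : List (List String))), ("true_labels", [])]))
      (PySem.Dict.mk (s.map (fun k => (k, PySem.Dict.mk [("predictions", ([] : List (List String))), ("true_labels", [])]))))
    = PySem.Dict.mk ((PySem.Set.update s langs).map (fun k => (k, PySem.Dict.mk [("predictions", ([] : List (List String))), ("true_labels", [])]))) := by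
  induction langs generalizing s with
  | nil => rfl
  | cons x langs ih =>
    rw [List.foldl_cons]
    have hv : PySem.Dict.ofList [("predictions", ([] : List (List String))), ("true_labels", ([] : List (List String)))] = PySem.Dict.mk [("predictions", []), ("true_labels", [])] := rfl
    rw [hv, pv_mkmap_insert s (fun _ => PySem.Dict.mk [("predictions", []), ("true_labels", [])]) x (PySem.Dict.mk [("predictions", []), ("true_labels", [])])]
    simp only [ite_self]
    have ih' := ih (PySem.Set.add s x)
    rw [hv] at ih'
    rw [ih']
    have hu : PySem.Set.update s (x :: langs) = PySem.Set.update (PySem.Set.add s x) langs := by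
      simp [PySem.Set.update]
    rw [hu]

-- port B's fold equals the ordered-dedup map
theorem pv_foldB_eq (langs : List String) (acc : List String) (f : String → List (String × List (List String))) :
    langs.foldl
      (fun out language => if out.any (fun q => q.1 == language) then out else out ++ [(language, f language)])
      (acc.map (fun k => (k, f k)))
    = (PySem.Set.update acc langs).map (fun k => (k, f k)) := by
  induction langs generalizing acc with
  | nil => rfl
  | cons x langs ih =>
    rw [List.foldl_cons, pv_any_map_key acc f x]
    have hupd : PySem.Set.update acc (x :: langs) = PySem.Set.update (PySem.Set.add acc x) langs := by
      simp [PySem.Set.update]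
    rw [hupd]
    by_cases hm : x ∈ acc
    · have hadd : PySem.Set.add acc x = acc := by
        unfold PySem.Set.add
        rw [pv_set_contains]
        simp [hm]
      rw [if_pos (show decide (x ∈ acc) = true by simp [hm]), hadd]
      exact ih acc
    · have hadd : PySem.Set.add acc x = acc ++ [x] := by
        unfold PySem.Set.add
        rw [pv_set_contains]
        simp [hm]
      rw [if_neg (show ¬ decide (x ∈ acc) = true by simp [hm]), hadd, ← ih (acc ++ [x])]
      congr 1
      simp

-- ===== VERDICT (by name: the statement is the Claim_ definition above) =====
theorem sort_by_language_spec : Claim_equal_sort_by_language := by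
  intro preds lbls langs _
  unfold Spec_sort_by_language sort_by_language sort_by_language_alt
  have hmem : ∀ t ∈ (preds.zip lbls).zip langs, t.2 ∈ PySem.Set.ofList langs := by
    intro t ht
    rw [PySem.Set.mem_ofList]
    exact (List.of_mem_zip ht).2
  have hempty : (PySem.Dict.empty : PySem.Dict String (PySem.Dict String (List (List String))))
      = PySem.Dict.mk (([] : List String).map (fun k => (k, PySem.Dict.mk [("predictions", []), ("true_labels", [])]))) := rfl
  rw [hempty, pv_init_eq langs []]
  have hofl : PySem.Set.update ([] : List String) langs = PySem.Set.ofList langs := rfl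
  rw [hofl]
  rw [pv_fold_modify_eq ((preds.zip lbls).zip langs) (PySem.Set.ofList langs) (fun _ => []) (fun _ => []) hmem]
  have hB := pv_foldB_eq langs ([] : List String)
      (fun language => [("predictions", (((preds.zip lbls).zip langs).filter (fun t => t.2 == language)).map (fun t => t.1.1)),
                        ("true_labels", (((preds.zip lbls).zip langs).filter (fun t => t.2 == language)).map (fun t => t.1.2))])
  simp only [List.map_nil] at hB
  rw [hB, hofl]
  simp only [List.map_map, List.nil_append]
  rfl
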